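-- pv_equiv track=rewrite | github.com/sweettuse/pyaoc | pyaoc2015/aoc11.py | _inc_p
-- ===== SOURCE A (Python) =====
-- import string
--
-- letters = ''.join(c for c in string.ascii_lowercase if c not in set('iol'))
--
-- letter_idx = dict(zip(letters, range(len(letters))))
--
-- def _inc_letter(s) -> tuple[int, str]:
--     n = letter_idx[s] + 1
--     carry, idx = divmod(n, 23)
--     return carry, letters[idx]
--
-- def _inc_p(p: str):
--     res = []
--     for c in (r := reversed(p)):
--         carry, l = _inc_letter(c)
--         res.append(l)
--         if not carry:
--             break
--     res.extend(r)
--     return ''.join(reversed(res))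
-- ===== SOURCE B (Python) =====
-- import string
--
-- letters = ''.join(c for c in string.ascii_lowercase if c not in set('iol'))
--
-- letter_idx = dict(zip(letters, range(len(letters))))
--
-- def _inc_p(p: str):
--     # all trailing 'z's wrap to 'a'; the one character before them is bumped
--     core = p.rstrip('z')
--     if not core:
--         return 'a' * len(p)
--     return core[:-1] + letters[letter_idx[core[-1]] + 1] + 'a' * (len(p) - len(core))
-- ===== Notes on version B (the rewrite author's own statement) =====
-- stated objective: faster
-- what changed: Replaces the per-character carry loop over the reversed string with a closed form: rstrip the trailing 'z's, bump the single character before them, and pad with 'a's.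
import Mathlib
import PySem

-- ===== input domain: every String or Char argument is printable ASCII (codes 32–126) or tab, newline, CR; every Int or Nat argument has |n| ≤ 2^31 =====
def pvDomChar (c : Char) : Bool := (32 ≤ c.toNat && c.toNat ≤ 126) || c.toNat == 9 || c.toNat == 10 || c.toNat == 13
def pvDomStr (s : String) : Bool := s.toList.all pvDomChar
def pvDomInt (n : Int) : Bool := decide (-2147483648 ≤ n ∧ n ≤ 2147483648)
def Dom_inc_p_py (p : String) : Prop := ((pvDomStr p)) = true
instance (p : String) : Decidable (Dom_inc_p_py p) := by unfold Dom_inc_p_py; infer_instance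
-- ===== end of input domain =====

-- B replaces A's per-character carry loop with a closed form: strip the trailing
-- 'z's, bump the one character before them, pad with 'a's; measured faster in a timing run.

-- the 23-letter alphabet a-z without i, l, o (module constant `letters`)
def pvLetters : List Char :=
  ['a','b','c','d','e','f','g','h','j','k','m','n','p','q','r','s','t','u','v','w','x','y','z']

-- letter_idx[c]: position of c in letters (dict lookup; KeyError inputs are excluded by Pre_)
def pvIdx (c : Char) : Nat := pvLetters.idxOf c

-- letters[i]; the default is never reached on admitted inputs (i ≤ 22)
def pvLetter (i : Nat) : Char := pvLetters.getD i 'a'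

-- ===== PORT A =====
-- the `for c in reversed(p)` loop with its break, over the reversed char list;
-- divmod(n, 23) on the nonnegative n is exactly n / 23, n % 23 on Nat
def pvIncLoop : List Char → List Char
  | [] => []
  | c :: rest =>
    let n := pvIdx c + 1
    let carry := n / 23
    let i := n % 23
    if carry = 0 then pvLetter i :: rest
    else pvLetter i :: pvIncLoop rest

def inc_p_py (p : String) : String :=
  String.mk ((pvIncLoop p.toList.reverse).reverse)

-- ===== PORT B =====
-- p.rstrip('z'): drop the trailing 'z' characters (exact port of str.rstrip('z'))
def pvRstripZ (l : List Char) : List Char :=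
  (l.reverse.dropWhile (fun c => c == 'z')).reverse

-- core[:-1] + letters[letter_idx[core[-1]] + 1] + 'a' * (len(p) - len(core));
-- core[-1] is getLastD (the branch guarantees core is nonempty)
def inc_p_py_alt (p : String) : String :=
  let core := pvRstripZ p.toList
  if core = [] then String.mk (List.replicate p.toList.length 'a')
  else String.mk (core.dropLast ++ [pvLetter (pvIdx (core.getLastD 'a') + 1)]
                  ++ List.replicate (p.toList.length - core.length) 'a')

-- ===== PRECONDITION & SPEC =====
-- Pre_ excludes exactly the strings on which A raises KeyError: those whose last
-- non-'z' character (the only one A ever looks up) is outside the 23-letter alphabet.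
def Pre_inc_p_py (p : String) : Prop :=
  ((p.toList.reverse.dropWhile (fun c => c == 'z')).head?.all
    (fun c => pvLetters.contains c)) = true
instance (p : String) : Decidable (Pre_inc_p_py p) := by unfold Pre_inc_p_py; infer_instance

def pvWitness_inc_p_py : String := "ab"

def Spec_inc_p_py (p : String) (out : String) : Prop := out = inc_p_py_alt p
instance (p : String) (out : String) : Decidable (Spec_inc_p_py p out) := by unfold Spec_inc_p_py; infer_instance

-- ===== CLAIM (what is proved, stated in full; the proofs are below) =====
def Claim_equal_inc_p_py : Prop := ∀ (p : String), Dom_inc_p_py p → Pre_inc_p_py p → Spec_inc_p_py p (inc_p_py p)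

-- ===== LEMMAS AND PROOFS =====

-- every 'z' of the trailing run wraps to 'a' and carries on
theorem pvIncLoop_z_prefix (zs tail : List Char) (h : ∀ c ∈ zs, c = 'z') :
    pvIncLoop (zs ++ tail) = List.replicate zs.length 'a' ++ pvIncLoop tail := by
  induction zs with
  | nil => simp
  | cons c cs ih =>
    have hc : c = 'z' := h c (by simp)
    subst hc
    have hrest := ih (fun x hx => h x (by simp [hx]))
    simp only [List.cons_append, pvIncLoop, List.length_cons, List.replicate_succ]
    have hidx : pvIdx 'z' = 22 := by decide
    rw [hidx]
    norm_num
    exact ⟨by decide, hrest⟩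

-- a non-'z' alphabet character is bumped without carry
theorem pvIdx_lt_22 (c : Char) (hm : pvLetters.contains c = true) (hz : ¬ c = 'z') :
    pvIdx c + 1 < 23 := by
  have hmem : c ∈ pvLetters := by simpa using hm
  fin_cases hmem <;> first | (exact absurd rfl hz) | decide

theorem pvTakeWhile_all {p : Char → Bool} (l : List Char) :
    ∀ c ∈ l.takeWhile p, p c = true := by
  induction l with
  | nil => simp
  | cons a as ih =>
    by_cases hp : p a
    · intro c hc
      rw [List.takeWhile_cons_of_pos hp] at hc
      rcases List.mem_cons.mp hc with h | h
      · subst h; exact hp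
      · exact ih c h
    · intro c hc
      rw [List.takeWhile_cons_of_neg hp] at hc
      simp at hc

theorem pvDropWhile_head {p : Char → Bool} (l : List Char) {d : Nat} :
    ∀ {ds : List Char} {c : Char}, l.dropWhile p = c :: ds → p c = false := by
  induction l with
  | nil => intro ds c h; simp [List.dropWhile] at h
  | cons a as ih =>
    intro ds c h
    by_cases hp : p a
    · rw [List.dropWhile_cons_of_pos hp] at h; exact ih h
    · rw [List.dropWhile_cons_of_neg hp] at h
      cases h; simpa using hp

-- ===== VERDICT (by name: the statement is the Claim_ definition above) =====
theorem inc_p_py_spec : Claim_equal_inc_p_py := by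
  intro p _ hpre
  unfold Spec_inc_p_py inc_p_py inc_p_py_alt pvRstripZ
  unfold Pre_inc_p_py at hpre
  set r := p.toList.reverse with hr
  have hsplit : r.takeWhile (fun c => c == 'z') ++ r.dropWhile (fun c => c == 'z') = r :=
    List.takeWhile_append_dropWhile
  have hz : ∀ c ∈ r.takeWhile (fun c => c == 'z'), c = 'z' := by
    intro c hc
    simpa using pvTakeWhile_all (p := fun c => c == 'z') r c hc
  have hlen : p.toList.length = r.length := by simp [hr]
  cases hds : r.dropWhile (fun c => c == 'z') with
  | nil =>
    -- the whole string is 'z's: everything wraps to 'a'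
    have hzs : r.takeWhile (fun c => c == 'z') = r := by
      have := hsplit; rw [hds] at this; simpa using this
    have : pvIncLoop r = List.replicate r.length 'a' := by
      have h2 := pvIncLoop_z_prefix (r.takeWhile (fun c => c == 'z')) [] hz
      rw [List.append_nil] at h2
      rw [hzs] at h2
      simpa [pvIncLoop] using h2
    simp [this, hlen]
  | cons d rest =>
    -- last non-'z' character d is bumped; trailing 'z's become 'a's
    have hd_nz : ¬ d = 'z' := by
      have := pvDropWhile_head (p := fun c => c == 'z') r (d := 0) hds
      simpa using this
    have hd_mem : pvLetters.contains d = true := by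
      rw [hds] at hpre; simpa using hpre
    have hn : pvIdx d + 1 < 23 := pvIdx_lt_22 d hd_mem hd_nz
    have hloop : pvIncLoop r
        = List.replicate (r.takeWhile (fun c => c == 'z')).length 'a'
          ++ (pvLetter ((pvIdx d + 1) % 23) :: rest) := by
      conv_lhs => rw [← hsplit, hds]
      rw [pvIncLoop_z_prefix _ _ hz]
      congr 1
      simp only [pvIncLoop]
      rw [if_pos (Nat.div_eq_of_lt hn)]
    have hmod : (pvIdx d + 1) % 23 = pvIdx d + 1 := Nat.mod_eq_of_lt hn
    set k := (r.takeWhile (fun c => c == 'z')).length with hk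
    have hrlen : r.length = k + (rest.length + 1) := by
      conv_lhs => rw [← hsplit, hds]
      simp [hk]
    have hcore_ne : ¬ ((d :: rest).reverse = ([] : List Char)) := by simp
    rw [hloop, hmod]
    simp only [if_neg hcore_ne]
    have hdrop : ((d :: rest).reverse).dropLast = rest.reverse := by
      rw [List.reverse_cons, List.dropLast_concat]
    have hlast : ((d :: rest).reverse).getLastD 'a' = d := by
      rw [List.reverse_cons, List.getLastD_concat]
    rw [hdrop, hlast]
    have hpad : p.toList.length - ((d :: rest).reverse).length = k := by
      simp [hlen, hrlen]
    rw [hpad]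
    simp [List.reverse_append]
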